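-- pv_equiv track=rewrite | github.com/Oktovivian/Tubes_TBA_Kelompok-9 | FA_TBA_Kelompok9.py | kurawalDepan
-- ===== SOURCE A (Python) =====
-- def inTerminal(teks, terminal):
--     status = True
--     i = 0
--     while i < len(teks)-1 and status:
--         if teks[i] not in terminal:
--             status = False
--         i+=1
--     return status
--
-- def kurawalDepan(teks):
--     terminal=['{']
--     daftarState=['Q0','kurawalDpn']
--     tabel=[['kurawalDpn'], ['error']]
--     state='Q0'
--     i=0
--     teks = ''.join(teks)
--     teks+='#'
--     status=teks[i] != '#' and inTerminal(teks, terminal)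
--     while (status and teks[i]!='#'):
--         state=tabel[daftarState.index(state)][terminal.index(teks[i])]
--         i+=1
--         if (state=='error'):
--             status=False
--
--     if state != 'kurawalDpn':
--         state = 'error'
--     return state
-- ===== SOURCE B (Python) =====
-- def kurawalDepan(teks):
--     teks = ''.join(teks)
--     return 'kurawalDpn' if teks == '{' else 'error'
-- ===== Notes on version B (the rewrite author's own statement) =====
-- stated objective: simpler
-- what changed: The DFA accepts exactly one string, so B replaces the state-table scan plus the inTerminal pre-pass with a single closed-form equality test against '{'.
import Mathlib
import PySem

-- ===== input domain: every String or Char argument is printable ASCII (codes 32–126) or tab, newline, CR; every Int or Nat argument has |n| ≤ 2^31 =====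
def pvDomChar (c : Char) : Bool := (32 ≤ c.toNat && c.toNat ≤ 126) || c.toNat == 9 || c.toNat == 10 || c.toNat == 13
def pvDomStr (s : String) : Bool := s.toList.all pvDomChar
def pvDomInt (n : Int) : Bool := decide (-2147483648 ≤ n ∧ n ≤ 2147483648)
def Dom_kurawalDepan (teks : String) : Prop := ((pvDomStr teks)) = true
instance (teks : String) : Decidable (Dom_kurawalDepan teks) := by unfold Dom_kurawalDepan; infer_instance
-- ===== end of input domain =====

-- B replaces A's DFA table scan (with the inTerminal pre-pass) by the closed-form test teks == '{'; objective: simpler.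

-- ===== PORT A =====
-- while i < len(teks)-1 and status: if teks[i] not in terminal: status = False; i += 1
-- (structural recursion over the list; stopping one short of the end = the [_] case; early exit = false)
def inTerminalGo (terminal : List Char) : List Char → Bool
  | [] => true
  | [_] => true
  | c :: d :: rest => if c ∈ terminal then inTerminalGo terminal (d :: rest) else false

def inTerminal (teks terminal : List Char) : Bool := inTerminalGo terminal teks

-- the main while loop; tabel/daftarState/terminal are A's constants.  The .getD 0 after index?
-- is unreachable fallback: whenever the loop body runs, state ∈ daftarState and c ∈ terminal
-- (Python would raise ValueError otherwise, which never happens).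
def kurawalLoop : List Char → String → Bool → String
  | [], state, _ => state
  | c :: rest, state, status =>
    if status && c ≠ '#' then
      let state' := (([["kurawalDpn"], ["error"]].getD
          ((PySem.List.index? ["Q0", "kurawalDpn"] state).getD 0) []).getD
          ((PySem.List.index? ['{'] c).getD 0) "error")
      if state' = "error" then kurawalLoop rest state' false
      else kurawalLoop rest state' status
    else state

def kurawalCore (l : List Char) : String :=
  let terminal : List Char := ['{']
  let l' := l ++ ['#']                                   -- teks += '#'
  let status := decide (l'.headD '#' ≠ '#') && inTerminal l' terminal
  let state := kurawalLoop l' "Q0" status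
  if state ≠ "kurawalDpn" then "error" else state

def kurawalDepan (teks : String) : String := kurawalCore teks.toList   -- ''.join(teks) on a str is the string itself

-- ===== PORT B =====
def kurawalDepan_alt (teks : String) : String :=          -- ''.join(teks) on a str is the identity
  if teks = "{" then "kurawalDpn" else "error"

-- ===== PRECONDITION & SPEC =====
def Spec_kurawalDepan (teks : String) (out : String) : Prop := out = kurawalDepan_alt teks
instance (teks : String) (out : String) : Decidable (Spec_kurawalDepan teks out) := by unfold Spec_kurawalDepan; infer_instance

-- ===== CLAIM (what is proved, stated in full; the proofs are below) =====
def Claim_equal_kurawalDepan : Prop := ∀ (teks : String), Dom_kurawalDepan teks → Spec_kurawalDepan teks (kurawalDepan teks)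

-- ===== LEMMAS AND PROOFS =====
theorem kurawalLoop_false (l : List Char) (state : String) :
    kurawalLoop l state false = state := by
  cases l <;> simp [kurawalLoop]

theorem inTerminalGo_append (l : List Char) :
    inTerminalGo ['{'] (l ++ ['#']) = l.all (fun c => decide (c = '{')) := by
  induction l with
  | nil => simp [inTerminalGo]
  | cons c rest ih =>
    cases rest with
    | nil => simp [inTerminalGo]
    | cons d rs =>
      simp only [List.cons_append] at ih
      simp [inTerminalGo, ih]

theorem kurawalLoop_two (rs : List Char) :
    kurawalLoop ('{' :: '{' :: rs) "Q0" true = "error" := by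
  have h1 : kurawalLoop ('{' :: '{' :: rs) "Q0" true
      = kurawalLoop ('{' :: rs) "kurawalDpn" true := rfl
  have h2 : kurawalLoop ('{' :: rs) "kurawalDpn" true
      = kurawalLoop rs "error" false := rfl
  rw [h1, h2, kurawalLoop_false]

theorem kurawalCore_eq (l : List Char) :
    kurawalCore l = (if l = ['{'] then "kurawalDpn" else "error") := by
  match l with
  | [] => decide
  | [c] =>
    by_cases hc : c = '{'
    · subst hc; decide
    · simp [kurawalCore, inTerminal, inTerminalGo, hc, kurawalLoop_false]
  | c :: d :: rs =>
    by_cases hc : c = '{'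
    · subst hc
      cases hst : inTerminalGo ['{'] ('{' :: d :: (rs ++ ['#'])) with
      | false =>
        simp [kurawalCore, inTerminal, hst, kurawalLoop_false]
      | true =>
        have hd : d = '{' := by
          have h3 : inTerminalGo ['{'] ((d :: rs) ++ ['#']) = true := by
            simpa [inTerminalGo] using hst
          rw [inTerminalGo_append] at h3
          simp at h3
          exact h3.1
        subst hd
        simp [kurawalCore, inTerminal, hst, kurawalLoop_two]
    · simp [kurawalCore, inTerminal, inTerminalGo, hc, kurawalLoop_false]

-- ===== VERDICT (by name: the statement is the Claim_ definition above) =====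
theorem kurawalDepan_spec : Claim_equal_kurawalDepan := by
  intro teks _
  unfold Spec_kurawalDepan kurawalDepan kurawalDepan_alt
  rw [kurawalCore_eq]
  have hiff : (teks.toList = ['{']) ↔ (teks = "{") := by
    rw [show ['{'] = "{".toList from rfl]
    exact String.toList_inj
  by_cases h : teks = "{"
  · simp [h]
  · have h' : teks.toList ≠ ['{'] := fun hl => h (hiff.mp hl)
    simp [h, h']
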